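-- pv_equiv track=rewrite | github.com/vishm/tibcorvstatscrape | TibcoDaemonInfoScraper.py | _prefix_halfitem_with
-- ===== SOURCE A (Python) =====
-- def _prefix_halfitem_with(prefix1: str, prefix2: str, collection: list):
--     retvalue = []
--     for i in range(0, len(collection)):
--         if i < len(collection) / 2:
--             retvalue.append(prefix1 + collection[i])
--         else:
--             retvalue.append(prefix2 + collection[i])
--     return retvalue
-- ===== SOURCE B (Python) =====
-- def _prefix_halfitem_with(prefix1: str, prefix2: str, collection: list):
--     lo, hi = 0, len(collection) - 1
--     front, back = [], []
--     while lo < hi: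
--         front.append(prefix1 + collection[lo])
--         back.append(prefix2 + collection[hi])
--         lo, hi = lo + 1, hi - 1
--     if lo == hi:
--         front.append(prefix1 + collection[lo])
--     return front + back[::-1]
-- ===== Notes on version B (the rewrite author's own statement) =====
-- stated objective: alternative
-- what changed: Replaces the single index loop with a per-element half test by a meets-in-the-middle two-pointer scan that pairs element i with element n-1-i, building the front half forward and the back half in reverse, with an odd-length middle handled once after the loop.
import Mathlib
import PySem

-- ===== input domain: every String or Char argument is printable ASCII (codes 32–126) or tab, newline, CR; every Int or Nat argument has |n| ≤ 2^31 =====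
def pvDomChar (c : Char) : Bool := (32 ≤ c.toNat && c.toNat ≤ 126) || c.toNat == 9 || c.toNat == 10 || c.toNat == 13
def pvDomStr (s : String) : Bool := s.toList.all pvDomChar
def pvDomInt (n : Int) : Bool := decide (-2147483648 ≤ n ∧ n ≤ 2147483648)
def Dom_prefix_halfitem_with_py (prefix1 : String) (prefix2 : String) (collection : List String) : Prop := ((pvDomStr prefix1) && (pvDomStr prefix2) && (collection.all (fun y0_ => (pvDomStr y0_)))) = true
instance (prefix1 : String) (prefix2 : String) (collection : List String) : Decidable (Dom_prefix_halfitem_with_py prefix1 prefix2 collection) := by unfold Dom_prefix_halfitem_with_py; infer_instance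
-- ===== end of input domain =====

-- B replaces A's per-index half test with a two-pointer scan pairing element i with element n-1-i; objective: alternative.


-- ===== PORT A =====
-- Literal port of A: loop over range(0, len), branch on 'i < len/2' (true division;
-- for integers i, n this is exactly '2*i < n'), append prefix + collection[i].
-- collection[i] is always in range here, so pyGetD with a default is exact.
def prefix_halfitem_with_py (prefix1 : String) (prefix2 : String) (collection : List String) : List String :=
  (PySem.List.pyRange 0 (collection.length : Int) 1).foldl
    (fun retvalue i =>
      if 2 * i < (collection.length : Int) then
        retvalue ++ [prefix1 ++ PySem.List.pyGetD collection i ""]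
      else
        retvalue ++ [prefix2 ++ PySem.List.pyGetD collection i ""]) []

-- ===== PORT B =====
-- Port of B's while loop: two pointers lo/hi stepping towards each other,
-- accumulating front (forward) and back (to be reversed).
def phAltLoop (prefix1 : String) (prefix2 : String) (collection : List String)
    (lo hi : Int) (front back : List String) : Int × Int × List String × List String :=
  if lo < hi then
    phAltLoop prefix1 prefix2 collection (lo + 1) (hi - 1)
      (front ++ [prefix1 ++ PySem.List.pyGetD collection lo ""])
      (back ++ [prefix2 ++ PySem.List.pyGetD collection hi ""])
  else (lo, hi, front, back)
termination_by (hi - lo).toNat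
decreasing_by omega

-- Port of B: run the two-pointer loop from (0, n-1), append the middle element
-- if the pointers met exactly, then concatenate front with the reversed back.
def prefix_halfitem_with_py_alt (prefix1 : String) (prefix2 : String) (collection : List String) : List String :=
  let r := phAltLoop prefix1 prefix2 collection 0 ((collection.length : Int) - 1) [] []
  let front := if r.1 = r.2.1 then r.2.2.1 ++ [prefix1 ++ PySem.List.pyGetD collection r.1 ""] else r.2.2.1
  front ++ r.2.2.2.reverse

-- ===== PRECONDITION & SPEC =====
def Spec_prefix_halfitem_with_py (prefix1 : String) (prefix2 : String) (collection : List String) (out : List String) : Prop := out = prefix_halfitem_with_py_alt prefix1 prefix2 collection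
instance (prefix1 : String) (prefix2 : String) (collection : List String) (out : List String) : Decidable (Spec_prefix_halfitem_with_py prefix1 prefix2 collection out) := by unfold Spec_prefix_halfitem_with_py; infer_instance

-- ===== CLAIM (what is proved, stated in full; the proofs are below) =====
def Claim_equal_prefix_halfitem_with_py : Prop := ∀ (prefix1 : String) (prefix2 : String) (collection : List String), Dom_prefix_halfitem_with_py prefix1 prefix2 collection → Spec_prefix_halfitem_with_py prefix1 prefix2 collection (prefix_halfitem_with_py prefix1 prefix2 collection)

-- ===== LEMMAS AND PROOFS =====

-- Characterisation of the two-pointer loop: starting from pointers j and n-1-j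
-- (with 2*j ≤ n) it performs ⌊n/2⌋ - j iterations, ending at (⌊n/2⌋, n-1-⌊n/2⌋),
-- with front extended by prefix1-prefixed elements j..⌊n/2⌋-1 in order and back
-- extended by prefix2-prefixed elements n-1-j down to n-⌊n/2⌋.
lemma phAltLoop_spec (p1 p2 : String) (xs : List String) :
    ∀ (d j : Nat) (front back : List String),
      xs.length / 2 - j ≤ d → 2 * j ≤ xs.length →
      phAltLoop p1 p2 xs (j : Int) ((xs.length : Int) - 1 - j) front back
        = (((xs.length / 2 : Nat) : Int), ((xs.length : Int) - 1 - ((xs.length / 2 : Nat) : Int)),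
           front ++ (List.range' j (xs.length / 2 - j)).map
             (fun i => p1 ++ PySem.List.pyGetD xs ((i : Nat) : Int) ""),
           back ++ ((List.range' (xs.length - xs.length / 2) (xs.length / 2 - j)).map
             (fun i => p2 ++ PySem.List.pyGetD xs ((i : Nat) : Int) "")).reverse) := by
  intro d
  induction d with
  | zero =>
    intro j front back hd hj
    have hjk : xs.length / 2 ≤ j := by omega
    have hstop : ¬ ((j : Int) < (xs.length : Int) - 1 - j) := by omega
    rw [phAltLoop.eq_def, if_neg hstop]
    have hk : xs.length / 2 = j := by omega
    simp [hk]
  | succ d ih =>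
    intro j front back hd hj
    by_cases hlt : (j : Int) < (xs.length : Int) - 1 - j
    · have hjn : 2 * j + 2 ≤ xs.length := by omega
      rw [phAltLoop.eq_def, if_pos hlt]
      have e1 : (j : Int) + 1 = ((j + 1 : Nat) : Int) := by push_cast; ring
      have e2 : (xs.length : Int) - 1 - (j : Int) - 1 = (xs.length : Int) - 1 - ((j + 1 : Nat) : Int) := by
        push_cast; ring
      rw [e1, e2, ih (j + 1) _ _ (by omega) (by omega)]
      have hjk : j < xs.length / 2 := by omega
      have hcnt : xs.length / 2 - j = (xs.length / 2 - (j + 1)) + 1 := by omega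
      simp only [Prod.mk.injEq]
      refine ⟨trivial, trivial, ?_, ?_⟩
      · rw [hcnt, List.range'_succ, List.map_cons]
        simp [List.append_assoc]
      · have hx : (xs.length - xs.length / 2) + 1 * (xs.length / 2 - (j + 1)) = xs.length - 1 - j := by
          omega
        have hcast : ((xs.length - 1 - j : Nat) : Int) = (xs.length : Int) - 1 - (j : Int) := by
          omega
        rw [hcnt, List.range'_concat, List.map_append, List.reverse_append, hx, ← hcast]
        simp [List.append_assoc]
    · have hk : xs.length / 2 = j := by omega
      rw [phAltLoop.eq_def, if_neg hlt]
      simp [hk]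

-- ===== VERDICT (by name: the statement is the Claim_ definition above) =====
theorem pv_main (p1 p2 : String) (xs : List String) :
    prefix_halfitem_with_py p1 p2 xs = prefix_halfitem_with_py_alt p1 p2 xs := by
  simp only [prefix_halfitem_with_py, prefix_halfitem_with_py_alt]
  have hloop := phAltLoop_spec p1 p2 xs (xs.length / 2) 0 [] [] (by omega) (by omega)
  simp only [Nat.cast_zero, Nat.sub_zero, sub_zero] at hloop
  rw [hloop]
  simp only [List.nil_append, List.reverse_reverse]
  have hbody : (fun (retvalue : List String) (i : Int) =>
      if 2 * i < (xs.length : Int) then retvalue ++ [p1 ++ PySem.List.pyGetD xs i ""]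
      else retvalue ++ [p2 ++ PySem.List.pyGetD xs i ""])
    = (fun retvalue i =>
        retvalue ++ [(if 2 * i < (xs.length : Int) then p1 else p2) ++ PySem.List.pyGetD xs i ""]) := by
    funext acc i; split_ifs <;> rfl
  rw [hbody, PySem.List.foldl_append_singleton_eq_map, List.nil_append]
  rw [PySem.List.pyRange_one, List.map_map]
  have hrange : (Int.toNat ((xs.length : Int) - 0)) = xs.length := by omega
  rw [hrange, List.range_eq_range']
  obtain ⟨n, hn⟩ : ∃ n, xs.length = n := ⟨_, rfl⟩
  rw [hn]
  obtain ⟨k, hk⟩ : ∃ k, n / 2 = k := ⟨_, rfl⟩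
  rw [hk]
  have hkn : 2 * k ≤ n ∧ n ≤ 2 * k + 1 := by omega
  by_cases hodd : ((k : Nat) : Int) = (n : Int) - 1 - ((k : Nat) : Int)
  · -- n odd: the pointers met, the middle element joins the front half
    have hn2 : n = 2 * k + 1 := by omega
    rw [if_pos hodd]
    have hmid : (List.range' 0 k).map (fun i => p1 ++ PySem.List.pyGetD xs ((i : Nat) : Int) "")
          ++ [p1 ++ PySem.List.pyGetD xs ((k : Nat) : Int) ""]
        = (List.range' 0 (k + 1)).map (fun i => p1 ++ PySem.List.pyGetD xs ((i : Nat) : Int) "") := by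
      rw [List.range'_concat]
      simp
    rw [hmid]
    have hsplit : List.range' 0 n = List.range' 0 (k + 1) ++ List.range' (k + 1) (n - (k + 1)) := by
      have h := @List.range'_append 0 (k + 1) (n - (k + 1)) 1
      rw [show 0 + 1 * (k + 1) = k + 1 from by omega,
          show (k + 1) + (n - (k + 1)) = n from by omega] at h
      exact h.symm
    rw [hsplit, List.map_append]
    congr 1
    · apply List.map_congr_left
      intro i hi
      have hi' : i < k + 1 := by
        have := List.mem_range'_1.mp hi
        omega
      have h2 : 2 * (i : Int) < (n : Int) := by omega
      simp only [Function.comp_apply, if_pos h2, zero_add]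
    · have hcnt2 : n - (k + 1) = k := by omega
      have hbase : n - k = k + 1 := by omega
      rw [hcnt2, hbase]
      apply List.map_congr_left
      intro i hi
      have hi' : k + 1 ≤ i := (List.mem_range'_1.mp hi).1
      have h2 : ¬ (2 * (i : Int) < (n : Int)) := by omega
      simp only [Function.comp_apply, if_neg h2, zero_add]
  · -- n even: the pointers crossed, no middle element
    have hn2 : n = 2 * k := by omega
    rw [if_neg hodd]
    have hsplit : List.range' 0 n = List.range' 0 k ++ List.range' k (n - k) := by
      have h := @List.range'_append 0 k (n - k) 1
      rw [show 0 + 1 * k = k from by omega, show k + (n - k) = n from by omega] at h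
      exact h.symm
    rw [hsplit, List.map_append]
    congr 1
    · apply List.map_congr_left
      intro i hi
      have hi' : i < k := by
        have := List.mem_range'_1.mp hi
        omega
      have h2 : 2 * (i : Int) < (n : Int) := by omega
      simp only [Function.comp_apply, if_pos h2, zero_add]
    · have hbase : n - k = k := by omega
      rw [hbase]
      apply List.map_congr_left
      intro i hi
      have hi' : k ≤ i := (List.mem_range'_1.mp hi).1
      have h2 : ¬ (2 * (i : Int) < (n : Int)) := by omega
      simp only [Function.comp_apply, if_neg h2, zero_add]

theorem prefix_halfitem_with_py_spec : Claim_equal_prefix_halfitem_with_py := by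
  intro p1 p2 xs _
  unfold Spec_prefix_halfitem_with_py
  exact pv_main p1 p2 xs
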